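-- pv_equiv track=rewrite | github.com/NaayoungKwon/AlgorithmStudy | 백준/Silver/1522. 문자열 교환/문자열 교환.py | solution
-- ===== SOURCE A (Python) =====
-- def solution(s):
--
--     result = len(s)
--     a_count = s.count('a')
--     s = s+s
--     for i in range(len(s) - a_count + 1):
--         t = s[i : i+a_count]
--         result = min(result, t.count('b'))
--     return result
-- ===== SOURCE B (Python) =====
-- def solution(s):
--     n = len(s)
--     a = s.count('a')
--     if a == 0:
--         return 0
--     d = s + s
--     cur = d[:a].count('b')
--     best = cur
--     for i in range(1, n):
--         cur += (d[i + a - 1] == 'b') - (d[i - 1] == 'b')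
--         if cur < best:
--             best = cur
--     return best
-- ===== Notes on version B (the rewrite author's own statement) =====
-- stated objective: faster
-- what changed: Replaces the full recount inside every candidate window of the doubled string by a single incremental sliding-window pass over offsets 0..n-1 that updates the window count in O(1) per step.
import Mathlib
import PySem

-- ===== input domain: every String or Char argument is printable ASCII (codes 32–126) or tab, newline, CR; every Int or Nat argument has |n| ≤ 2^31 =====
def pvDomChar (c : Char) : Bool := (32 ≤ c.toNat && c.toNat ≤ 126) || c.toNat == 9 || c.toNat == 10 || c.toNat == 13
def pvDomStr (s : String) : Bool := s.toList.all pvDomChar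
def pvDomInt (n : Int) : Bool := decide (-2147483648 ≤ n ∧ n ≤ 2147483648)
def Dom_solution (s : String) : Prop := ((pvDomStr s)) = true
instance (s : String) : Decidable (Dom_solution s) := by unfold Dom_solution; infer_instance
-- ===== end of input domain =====

-- B replaces A's per-offset full recount inside each window of the doubled string by one incremental sliding-window pass.

-- ===== PORT A =====
def solution (s : String) : Int :=
  let result : Int := (PySem.Str.len s : Int)
  let aCount : Nat := PySem.Str.count s "a"
  -- s = s + s : string concatenation, ported on the code-point list (exact)
  let d : List Char := s.toList ++ s.toList
  (PySem.List.pyRange 0 ((d.length : Int) - (aCount : Int) + 1)).foldl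
    (fun r i =>
      let t := PySem.List.slice d (some i) (some (i + (aCount : Int)))
      min r ((PySem.Chars.count t ['b'] : Int)))
    result

-- ===== PORT B =====
def solution_alt (s : String) : Int :=
  let cs : List Char := s.toList
  let n : Nat := cs.length
  let a : Nat := PySem.Chars.count cs ['a']
  if a = 0 then 0
  else
    let d : List Char := cs ++ cs
    let cur0 : Int := (PySem.Chars.count (PySem.List.slice d none (some (a : Int))) ['b'] : Int)
    -- d[i+a-1] and d[i-1] are always in range for i ∈ [1, n-1] with a ≥ 1, so getD is exact Python indexing here
    let st := (PySem.List.pyRange 1 (n : Int)).foldl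
      (fun (st : Int × Int) i =>
        let cur := st.1 + ((if PySem.List.pyGetD d (i + (a : Int) - 1) ' ' = 'b' then (1 : Int) else 0)
                         - (if PySem.List.pyGetD d (i - 1) ' ' = 'b' then (1 : Int) else 0))
        (cur, if cur < st.2 then cur else st.2))
      (cur0, cur0)
    st.2

-- ===== PRECONDITION & SPEC =====
def Spec_solution (s : String) (out : Int) : Prop := out = solution_alt s
instance (s : String) (out : Int) : Decidable (Spec_solution s out) := by unfold Spec_solution; infer_instance

-- ===== CLAIM (what is proved, stated in full; the proofs are below) =====
def Claim_equal_solution : Prop := ∀ (s : String), Dom_solution s → Spec_solution s (solution s)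

-- ===== LEMMAS AND PROOFS =====

-- PySem.Chars.count with a single-character needle is List.count
lemma countGo_single (c : Char) : ∀ (l : List Char) (fuel acc : Nat), l.length ≤ fuel →
    PySem.Chars.count.go [c] fuel l acc = acc + l.count c := by
  intro l
  induction l with
  | nil => intro fuel acc _; cases fuel <;> simp [PySem.Chars.count.go]
  | cons x t ih =>
    intro fuel acc h
    cases fuel with
    | zero => simp at h
    | succ f =>
      rw [show PySem.Chars.count.go [c] (f+1) (x::t) acc =
            if [c].isPrefixOf (x::t) then PySem.Chars.count.go [c] f (List.drop 1 (x::t)) (acc+1)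
            else PySem.Chars.count.go [c] f t acc from rfl]
      have hlen : t.length ≤ f := by simpa using h
      by_cases hx : c = x
      · subst hx
        simp [List.isPrefixOf, ih f (acc+1) hlen]
        omega
      · simp [List.isPrefixOf, beq_iff_eq, hx, ih f acc hlen, Ne.symm hx]

lemma count_single (l : List Char) (c : Char) :
    PySem.Chars.count l [c] = l.count c := by
  simpa [PySem.Chars.count] using countGo_single c l l.length 0 le_rfl

-- the 'b'-count of the length-a window at offset i of the doubled string
def wcnt (cs : List Char) (a i : Nat) : Int :=
  ((((cs ++ cs).drop i).take a).count 'b' : Int)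

lemma wcnt_le (cs : List Char) (a i : Nat) : wcnt cs a i ≤ (a : Int) := by
  have h1 := List.count_le_length (l := (((cs ++ cs).drop i).take a)) (a := 'b')
  have h2 := List.length_take_le a ((cs ++ cs).drop i)
  simp only [wcnt]
  exact_mod_cast le_trans h1 h2

-- sliding the window one step to the right
lemma wcnt_slide (cs : List Char) (a j : Nat) (ha : 1 ≤ a)
    (hj : j + a < (cs ++ cs).length) :
    wcnt cs a (j + 1) =
      wcnt cs a j
      + (if (cs ++ cs).getD (j + a) ' ' = 'b' then (1 : Int) else 0)
      - (if (cs ++ cs).getD j ' ' = 'b' then (1 : Int) else 0) := by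
  obtain ⟨m, rfl⟩ : ∃ m, a = m + 1 := ⟨a - 1, by omega⟩
  set d := cs ++ cs with hd
  have hjlen : j < d.length := by omega
  have hjm : j + 1 + m < d.length := by omega
  have e1 : d.drop j = d[j] :: d.drop (j+1) := List.drop_eq_getElem_cons hjlen
  have e2 : (d.drop (j+1))[m]? = some d[j+1+m] := by
    rw [List.getElem?_drop]; exact List.getElem?_eq_getElem hjm
  have egd1 : d.getD (j + (m+1)) ' ' = d[j+1+m] := by
    have h : j + (m+1) = j+1+m := by omega
    rw [h]; exact List.getD_eq_getElem d ' ' hjm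
  have egd2 : d.getD j ' ' = d[j] := List.getD_eq_getElem d ' ' hjlen
  have w0 : wcnt cs (m+1) j
      = ((List.count 'b' ((d.drop (j+1)).take m) : Int)) + (if d[j] = 'b' then 1 else 0) := by
    simp only [wcnt, ← hd, e1, List.take_succ_cons, List.count_cons]
    push_cast
    split_ifs <;> simp_all
  have w1 : wcnt cs (m+1) (j+1)
      = ((List.count 'b' ((d.drop (j+1)).take m) : Int)) + (if d[j+1+m] = 'b' then 1 else 0) := by
    simp only [wcnt, ← hd, List.take_add_one, e2, List.count_append, Option.toList_some,
      List.count_singleton]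
    push_cast
    split_ifs <;> simp_all
  rw [w0, w1, egd1, egd2]
  split_ifs <;> omega

-- windows at offsets n+i repeat the windows at offsets i
lemma wcnt_period (cs : List Char) (a i : Nat) (h : i + a ≤ cs.length) :
    wcnt cs a (cs.length + i) = wcnt cs a i := by
  have h1 : (cs ++ cs).drop (cs.length + i) = cs.drop i := by
    simp [List.drop_append]
  have h2 : (cs ++ cs).drop i = cs.drop i ++ cs := by
    rw [List.drop_append_of_le_length (by omega)]
  have h3 : a ≤ (cs.drop i).length := by simp; omega
  simp [wcnt, h1, h2, List.take_append_of_le_length h3]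

-- A's per-window value
def gA (cs : List Char) (a : Nat) (i : Int) : Int :=
  (PySem.Chars.count (PySem.List.slice (cs ++ cs) (some i) (some (i + (a : Int)))) ['b'] : Int)

lemma gA_nonneg (cs : List Char) (a : Nat) (i : Int) : 0 ≤ gA cs a i := by
  simp [gA]

lemma gA_eq (cs : List Char) (a : Nat) (i : Int) (h : 0 ≤ i) :
    gA cs a i = wcnt cs a i.toNat := by
  obtain ⟨k, rfl⟩ := Int.eq_ofNat_of_zero_le h
  have hsum : (k : Int) + (a : Int) = ((k + a : Nat) : Int) := by push_cast; ring
  rw [gA, hsum, PySem.List.slice_natCast]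
  have : k + a - k = a := by omega
  rw [this, count_single, wcnt]
  simp

-- generic foldl-min facts
lemma fold_min_le_init (g : Int → Int) (L : List Int) (init : Int) :
    L.foldl (fun r i => min r (g i)) init ≤ init := by
  induction L generalizing init with
  | nil => simp
  | cons x t ih => exact le_trans (ih _) (min_le_left _ _)

lemma fold_min_le_mem (g : Int → Int) (L : List Int) {x : Int} (hx : x ∈ L) (init : Int) :
    L.foldl (fun r i => min r (g i)) init ≤ g x := by
  induction L generalizing init with
  | nil => cases hx
  | cons y t ih =>
    rcases List.mem_cons.mp hx with h | h
    · subst h; exact le_trans (fold_min_le_init g t _) (min_le_right _ _)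
    · exact ih h _

lemma le_fold_min (g : Int → Int) (L : List Int) (init c : Int)
    (hc : c ≤ init) (h : ∀ x ∈ L, c ≤ g x) :
    c ≤ L.foldl (fun r i => min r (g i)) init := by
  induction L generalizing init with
  | nil => simpa
  | cons y t ih =>
    exact ih (init := min init (g y)) (le_min hc (h y (by simp)))
      (fun x hx => h x (by simp [hx]))

-- B's loop body
def stepB (d : List Char) (a : Nat) (st : Int × Int) (i : Int) : Int × Int :=
  let cur := st.1 + ((if PySem.List.pyGetD d (i + (a : Int) - 1) ' ' = 'b' then (1 : Int) else 0)
                   - (if PySem.List.pyGetD d (i - 1) ' ' = 'b' then (1 : Int) else 0))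
  (cur, if cur < st.2 then cur else st.2)

-- B's loop invariant: cur tracks the current window, best folds min over the visited windows
lemma B_loop (cs : List Char) (a : Nat) (ha : 1 ≤ a) (han : a ≤ cs.length) :
    ∀ (m i : Nat) (best : Int), 1 ≤ i → i + m = cs.length →
    (PySem.List.pyRange (i : Int) (cs.length : Int)).foldl (stepB (cs ++ cs) a) (wcnt cs a (i-1), best)
    = (wcnt cs a (cs.length - 1),
       (PySem.List.pyRange (i : Int) (cs.length : Int)).foldl
         (fun r j => min r (wcnt cs a j.toNat)) best) := by
  intro m
  induction m with
  | zero =>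
    intro i best h1 h2
    have hnil : PySem.List.pyRange (i : Int) (cs.length : Int) = [] := by
      apply List.eq_nil_iff_forall_not_mem.mpr
      intro x hx
      have := PySem.List.mem_pyRange_one.mp hx
      omega
    rw [hnil]
    simp only [List.foldl_nil]
    rw [show i - 1 = cs.length - 1 from by omega]
  | succ m ih =>
    intro i best h1 h2
    have hlt : (i : Int) < (cs.length : Int) := by exact_mod_cast (by omega : i < cs.length)
    rw [PySem.List.pyRange_one_cons hlt]
    simp only [List.foldl_cons]
    have hidx1 : (i : Int) + (a : Int) - 1 = ((i - 1 + a : Nat) : Int) := by push_cast [h1]; omega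
    have hidx2 : (i : Int) - 1 = ((i - 1 : Nat) : Int) := by push_cast [h1]; omega
    have hslide' : wcnt cs a i =
        (wcnt cs a (i-1) + if (cs ++ cs).getD (i-1+a) ' ' = 'b' then 1 else 0)
          - if (cs ++ cs).getD (i-1) ' ' = 'b' then 1 else 0 := by
      have h' : i - 1 + 1 = i := by omega
      conv_lhs => rw [← h']
      exact wcnt_slide cs a (i-1) ha (by simp; omega)
    have hval : wcnt cs a (i-1)
        + ((if (cs ++ cs).getD (i-1+a) ' ' = 'b' then (1:Int) else 0)
         - (if (cs ++ cs).getD (i-1) ' ' = 'b' then (1:Int) else 0)) = wcnt cs a i := by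
      rw [hslide']; ring
    have hcur : (stepB (cs ++ cs) a (wcnt cs a (i-1), best) (i : Int)).1 = wcnt cs a i := by
      simp only [stepB, hidx1, hidx2, PySem.List.pyGetD_natCast]
      exact hval
    have hbest : (stepB (cs ++ cs) a (wcnt cs a (i-1), best) (i : Int)).2
        = min best (wcnt cs a ((i : Int).toNat)) := by
      simp only [stepB, hidx1, hidx2, PySem.List.pyGetD_natCast]
      rw [hval, show ((i : Int)).toNat = i from by omega]
      rcases le_or_gt best (wcnt cs a i) with h | h
      · rw [min_eq_left h]; split_ifs <;> omega
      · rw [min_eq_right (le_of_lt h)]; split_ifs <;> omega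
    have hst : stepB (cs ++ cs) a (wcnt cs a (i-1), best) (i : Int)
        = (wcnt cs a i, min best (wcnt cs a ((i : Int).toNat))) := by
      rw [Prod.ext_iff]; exact ⟨hcur, hbest⟩
    rw [hst]
    have hcast : (i : Int) + 1 = ((i + 1 : Nat) : Int) := by push_cast; ring
    rw [hcast]
    have := ih (i + 1) (min best (wcnt cs a ((i : Int).toNat))) (by omega) (by omega)
    simpa using this

-- A as a fold of min over its per-window values
lemma A_fold (s : String) :
    solution s = (PySem.List.pyRange 0 (((s.toList ++ s.toList).length : Int)
        - ((PySem.Chars.count s.toList ['a'] : Nat) : Int) + 1)).foldl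
      (fun r i => min r (gA s.toList (PySem.Chars.count s.toList ['a']) i))
      (s.toList.length : Int) := by
  simp only [solution, gA, PySem.Str.len_eq, PySem.Str.count_eq]
  rfl

-- B as a fold of min over the window counts at offsets 0..n-1 (via the loop invariant)
lemma B_fold (s : String) (ha0 : PySem.Chars.count s.toList ['a'] ≠ 0)
    (han : PySem.Chars.count s.toList ['a'] ≤ s.toList.length) :
    solution_alt s = (PySem.List.pyRange 1 (s.toList.length : Int)).foldl
      (fun r j => min r (wcnt s.toList (PySem.Chars.count s.toList ['a']) j.toNat))
      (wcnt s.toList (PySem.Chars.count s.toList ['a']) 0) := by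
  set cs := s.toList with hcs
  set a : Nat := PySem.Chars.count cs ['a'] with haval
  have hc0 : (PySem.Chars.count (PySem.List.slice (cs ++ cs) none (some (a : Int))) ['b'] : Int)
      = wcnt cs a 0 := by
    rw [PySem.List.slice_to (cs ++ cs) (by positivity), count_single, wcnt]
    simp
  have hB : solution_alt s
      = ((PySem.List.pyRange 1 (cs.length : Int)).foldl (stepB (cs ++ cs) a)
          (wcnt cs a 0, wcnt cs a 0)).2 := by
    simp only [solution_alt, ← hcs, ← haval, if_neg ha0, hc0]
    rfl
  have hBL := B_loop cs a (by omega) han (cs.length - 1) 1 (wcnt cs a 0)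
      le_rfl (by omega)
  rw [show ((1 : Nat) : Int) = (1 : Int) from by norm_num,
      show (1 : Nat) - 1 = 0 from rfl] at hBL
  rw [hB, hBL]

-- ===== VERDICT (by name: the statement is the Claim_ definition above) =====
theorem solution_spec : Claim_equal_solution := by
  intro s _
  show solution s = solution_alt s
  set cs := s.toList with hcs
  set a : Nat := PySem.Chars.count cs ['a'] with haval
  set n : Nat := cs.length with hn
  have han : a ≤ n := by
    rw [haval, count_single]
    exact List.count_le_length
  have hlen : (cs ++ cs).length = n + n := by rw [List.length_append]
  rw [A_fold s, ← hcs, ← haval, ← hn]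
  by_cases ha0 : a = 0
  · -- no 'a' at all: every window is empty, both sides are 0
    have hBz : solution_alt s = 0 := by
      simp only [solution_alt, ← hcs, ← haval, ha0]
      simp
    rw [hBz]
    have h0mem : (0 : Int) ∈ PySem.List.pyRange 0 (((cs ++ cs).length : Int) - (a : Int) + 1) := by
      apply PySem.List.mem_pyRange_one.mpr
      constructor
      · exact le_rfl
      · rw [hlen]; push_cast [ha0]; omega
    apply le_antisymm
    · have h1 := fold_min_le_mem (gA cs a) _ h0mem (n : Int)
      have h2 : gA cs a 0 = wcnt cs a 0 := gA_eq cs a 0 le_rfl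
      have h3 := wcnt_le cs a 0
      rw [h2] at h1
      have : ((a : Nat) : Int) = 0 := by simp [ha0]
      omega
    · apply le_fold_min
      · positivity
      · intro x _; exact gA_nonneg cs a x
  · -- a ≥ 1: compare the two min-folds window by window
    rw [B_fold s (by rw [← haval]; exact ha0) (by rw [← haval, ← hcs, ← hn]; exact han),
        ← hcs, ← haval, ← hn]
    have ha1 : 1 ≤ a := by omega
    have hn1 : 1 ≤ n := by omega
    apply le_antisymm
    · -- A's fold ≤ B's fold: every generator of B's fold is a generator of A's fold
      apply le_fold_min
      · -- ≤ B's initial value wcnt 0 = gA 0, and 0 is in A's range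
        have h0mem : (0 : Int) ∈ PySem.List.pyRange 0 (((cs ++ cs).length : Int) - (a : Int) + 1) := by
          apply PySem.List.mem_pyRange_one.mpr
          refine ⟨le_rfl, ?_⟩
          rw [hlen]
          have : (a : Int) ≤ (n : Int) := by exact_mod_cast han
          push_cast
          omega
        have h1 := fold_min_le_mem (gA cs a) _ h0mem (n : Int)
        rwa [gA_eq cs a 0 le_rfl] at h1
      · intro x hx
        obtain ⟨hx1, hx2⟩ := PySem.List.mem_pyRange_one.mp hx
        have hxmem : x ∈ PySem.List.pyRange 0 (((cs ++ cs).length : Int) - (a : Int) + 1) := by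
          apply PySem.List.mem_pyRange_one.mpr
          refine ⟨by omega, ?_⟩
          rw [hlen]
          have : (a : Int) ≤ (n : Int) := by exact_mod_cast han
          push_cast
          omega
        have h1 := fold_min_le_mem (gA cs a) _ hxmem (n : Int)
        rwa [gA_eq cs a x (by omega)] at h1
    · -- B's fold ≤ A's fold: reduce every A-window to an equal B-window via periodicity
      have key : ∀ k : Nat, k < n →
          (PySem.List.pyRange 1 (n : Int)).foldl
            (fun r j => min r (wcnt cs a j.toNat)) (wcnt cs a 0) ≤ wcnt cs a k := by
        intro k hk
        rcases Nat.eq_zero_or_pos k with h | h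
        · rw [h]
          exact fold_min_le_init _ _ _
        · have hkm : ((k : Nat) : Int) ∈ PySem.List.pyRange 1 (n : Int) := by
            apply PySem.List.mem_pyRange_one.mpr
            constructor <;> [exact_mod_cast h; exact_mod_cast hk]
          have h1 := fold_min_le_mem (fun j => wcnt cs a j.toNat) _ hkm (wcnt cs a 0)
          simpa using h1
      apply le_fold_min
      · -- B's fold ≤ n (A's initial value)
        have h1 := fold_min_le_init (fun j => wcnt cs a j.toNat)
          (PySem.List.pyRange 1 (n : Int)) (wcnt cs a 0)
        have h2 := wcnt_le cs a 0
        have h3 : (a : Int) ≤ (n : Int) := by exact_mod_cast han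
        omega
      · intro x hx
        obtain ⟨hx1, hx2⟩ := PySem.List.mem_pyRange_one.mp hx
        rw [gA_eq cs a x hx1]
        have hxj : x = ((x.toNat : Nat) : Int) := by omega
        have hjb : x.toNat + a ≤ n + n := by rw [hlen] at hx2; omega
        rcases lt_or_ge x.toNat n with h | h
        · exact key x.toNat h
        · have hp : wcnt cs a x.toNat = wcnt cs a (x.toNat - n) := by
            conv_lhs => rw [show x.toNat = cs.length + (x.toNat - n) from by omega]
            exact wcnt_period cs a (x.toNat - n) (by omega)
          rw [hp]
          exact key (x.toNat - n) (by omega)
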